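-- pv_equiv track=rewrite | github.com/sutriptaroywork/python-project | gfg-dsa-sheet/day8/minimum_indexed_character.py | minimum_indexed_character
-- ===== SOURCE A (Python) =====
-- def minimum_indexed_character(str, patt):
--     str_arr = list(str)
--     patt_arr = list(patt)
--     lowest_index = -1
--     my_map = {}
--
--     for i in range(len(str_arr)):
--         if my_map.get(str_arr[i]) is None:
--             my_map[str_arr[i]] = i
--
--     for i in range(len(patt_arr)):
--         if my_map.get(patt_arr[i]) is not None:
--             index = my_map[patt_arr[i]]
--             if lowest_index == -1 or index < lowest_index:
--                 lowest_index = index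
--     return lowest_index
-- ===== SOURCE B (Python) =====
-- def minimum_indexed_character(str, patt):
--     patt_set = set(patt)
--     for i, ch in enumerate(str):
--         if ch in patt_set:
--             return i
--     return -1
-- ===== Notes on version B (the rewrite author's own statement) =====
-- stated objective: simpler
-- what changed: Instead of building a first-occurrence dict of str and then scanning patt keeping a running minimum with a -1 sentinel, B builds a set of patt's characters and scans str once in order, returning the first index whose character is in the set (the first such index is by definition the minimum).
import Mathlib
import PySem

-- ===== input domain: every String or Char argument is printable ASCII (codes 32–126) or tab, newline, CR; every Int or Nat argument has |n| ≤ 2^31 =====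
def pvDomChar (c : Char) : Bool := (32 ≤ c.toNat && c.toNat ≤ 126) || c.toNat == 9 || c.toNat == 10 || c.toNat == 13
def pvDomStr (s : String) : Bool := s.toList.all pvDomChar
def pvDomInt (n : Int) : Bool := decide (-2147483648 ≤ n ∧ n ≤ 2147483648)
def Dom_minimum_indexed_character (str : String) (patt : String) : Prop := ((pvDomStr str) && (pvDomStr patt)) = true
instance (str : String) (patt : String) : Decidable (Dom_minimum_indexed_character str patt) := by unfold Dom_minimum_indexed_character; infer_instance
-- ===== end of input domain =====

-- B replaces A's first-occurrence map of str + min-scan over patt by a single in-order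
-- scan of str against a set of patt's characters with early exit (simpler; the timing
-- run measured it constant-factor faster).


-- ===== PORT A =====
def minimum_indexed_character (str : String) (patt : String) : Int :=
  let str_arr := str.toList
  let patt_arr := patt.toList
  let lowest_index : Int := -1
  let my_map : PySem.Dict Char Int := PySem.Dict.empty
  -- for i in range(len(str_arr)): if my_map.get(str_arr[i]) is None: my_map[str_arr[i]] = i
  let my_map := (PySem.List.pyRange 0 (PySem.List.len str_arr)).foldl
    (fun m i =>
      match m.get? (PySem.List.pyGetD str_arr i ' ') with
      | none => m.insert (PySem.List.pyGetD str_arr i ' ') i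
      | some _ => m) my_map
  -- for i in range(len(patt_arr)): if my_map.get(patt_arr[i]) is not None: index = …; if …
  (PySem.List.pyRange 0 (PySem.List.len patt_arr)).foldl
    (fun lowest_index i =>
      match my_map.get? (PySem.List.pyGetD patt_arr i ' ') with
      | some index => if lowest_index = -1 ∨ index < lowest_index then index else lowest_index
      | none => lowest_index) lowest_index

-- ===== PORT B =====
-- the 'for i, ch in enumerate(str): if ch in patt_set: return i' loop with early return
def pvAltGo (ps : PySem.Set Char) : List (Int × Char) → Int
  | [] => -1
  | (i, ch) :: rest => if ch ∈ ps then i else pvAltGo ps rest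

def minimum_indexed_character_alt (str : String) (patt : String) : Int :=
  let patt_set : PySem.Set Char := PySem.Set.ofList patt.toList
  pvAltGo patt_set (PySem.List.enumerate str.toList)

-- ===== PRECONDITION & SPEC =====
def Spec_minimum_indexed_character (str : String) (patt : String) (out : Int) : Prop := out = minimum_indexed_character_alt str patt
instance (str : String) (patt : String) (out : Int) : Decidable (Spec_minimum_indexed_character str patt out) := by unfold Spec_minimum_indexed_character; infer_instance

-- ===== CLAIM (what is proved, stated in full; the proofs are below) =====
def Claim_equal_minimum_indexed_character : Prop := ∀ (str : String) (patt : String), Dom_minimum_indexed_character str patt → Spec_minimum_indexed_character str patt (minimum_indexed_character str patt)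

-- ===== LEMMAS AND PROOFS =====

-- B's scan equals "first index of a char of ps, else -1", phrased with findIdx?
theorem pvAltGo_eq (ps : PySem.Set Char) (l : List Char) : ∀ (s : Int),
    pvAltGo ps (PySem.List.enumerate l s) =
      (match l.findIdx? (fun ch => decide (ch ∈ ps)) with
       | some k => s + (k : Int)
       | none => -1) := by
  induction l with
  | nil => intro s; simp [PySem.List.enumerate, pvAltGo]
  | cons x xs ih =>
      intro s
      have he : PySem.List.enumerate (x :: xs) s = (s, x) :: PySem.List.enumerate xs (s + 1) := by
        simp [PySem.List.enumerate]
      rw [he]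
      by_cases hx : x ∈ ps
      · simp [pvAltGo, hx, List.findIdx?_cons]
      · simp only [pvAltGo, ih (s + 1), List.findIdx?_cons, hx, decide_false,
          Bool.false_eq_true, if_false]
        cases hfi : xs.findIdx? (fun ch => decide (ch ∈ ps)) with
        | none => simp
        | some k => simp; ring

-- A's first loop: the map sends c to the index of c's first occurrence (offset by s)
theorem pvMap_get (l : List Char) : ∀ (s : Int) (m : PySem.Dict Char Int) (c : Char),
    ((PySem.List.enumerate l s).foldl
      (fun m p =>
        match m.get? p.2 with
        | none => m.insert p.2 p.1
        | some _ => m) m).get? c =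
      (match m.get? c with
       | some v => some v
       | none => (l.findIdx? (· == c)).map (fun k => s + (k : Int))) := by
  induction l with
  | nil =>
      intro s m c
      simp [PySem.List.enumerate]
      cases m.get? c <;> simp
  | cons x xs ih =>
      intro s m c
      have he : PySem.List.enumerate (x :: xs) s = (s, x) :: PySem.List.enumerate xs (s + 1) := by
        simp [PySem.List.enumerate]
      rw [he, List.foldl_cons]
      cases hmx : m.get? x with
      | some v =>
          simp only [ih (s + 1) m c, List.findIdx?_cons]
          by_cases hxc : x = c
          · subst hxc
            simp [hmx]
          · simp only [beq_iff_eq, hxc, if_false]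
            cases hmc : m.get? c with
            | some w => simp
            | none =>
                cases hfi : xs.findIdx? (· == c) with
                | none => simp
                | some k => simp; ring
      | none =>
          simp only [ih (s + 1) (m.insert x s) c, List.findIdx?_cons]
          by_cases hxc : x = c
          · subst hxc
            simp [hmx]
          · rw [PySem.Dict.get?_insert, if_neg (fun h => hxc h.symm)]
            simp only [beq_iff_eq, hxc, if_false]
            cases hmc : m.get? c with
            | some w => simp
            | none =>
                cases hfi : xs.findIdx? (· == c) with
                | none => simp
                | some k => simp; ring

-- A's second loop with a nonnegative accumulator is a running minimum
theorem pvFold_min (g : Char → Option Int) (p : List Char)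
    (hnn : ∀ c j, g c = some j → 0 ≤ j) : ∀ (lo : Int), 0 ≤ lo →
    p.foldl
      (fun lo c =>
        match g c with
        | some index => if lo = -1 ∨ index < lo then index else lo
        | none => lo) lo =
    (p.filterMap g).foldl min lo := by
  induction p with
  | nil => intro lo _; simp
  | cons c p' ih =>
      intro lo hlo
      cases hgc : g c with
      | none => simpa [hgc] using ih lo hlo
      | some j =>
          have hj : 0 ≤ j := hnn c j hgc
          have : (if lo = -1 ∨ j < lo then j else lo) = min lo j := by
            rw [min_def]; split_ifs <;> omega
          simp only [List.foldl_cons, hgc, List.filterMap_cons, this]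
          exact ih (min lo j) (le_min hlo hj)

-- A's second loop from the -1 sentinel: -1 if no char of p is in the map, else the min value
theorem pvFold_sentinel (g : Char → Option Int) (p : List Char)
    (hnn : ∀ c j, g c = some j → 0 ≤ j) :
    p.foldl
      (fun lo c =>
        match g c with
        | some index => if lo = -1 ∨ index < lo then index else lo
        | none => lo) (-1) =
    (match p.filterMap g with
     | [] => -1
     | j :: rest => rest.foldl min j) := by
  induction p with
  | nil => simp
  | cons c p' ih =>
      cases hgc : g c with
      | none => simpa [hgc] using ih
      | some j =>
          have hj : 0 ≤ j := hnn c j hgc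
          simp only [List.foldl_cons, hgc, List.filterMap_cons]
          rw [if_pos (Or.inl trivial), pvFold_min g p' hnn j hj]

theorem minimum_indexed_character_eq (str patt : String) :
    minimum_indexed_character str patt = minimum_indexed_character_alt str patt := by
  unfold minimum_indexed_character minimum_indexed_character_alt
  dsimp only
  generalize str.toList = l
  generalize patt.toList = p
  -- loop 1 over range(len(str_arr)) is a fold over enumerate(str_arr)
  have hmap : (PySem.List.pyRange 0 (PySem.List.len l)).foldl
      (fun m i =>
        match m.get? (PySem.List.pyGetD l i ' ') with
        | none => m.insert (PySem.List.pyGetD l i ' ') i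
        | some _ => m) PySem.Dict.empty =
      (PySem.List.enumerate l).foldl
        (fun m q =>
          match m.get? q.2 with
          | none => m.insert q.2 q.1
          | some _ => m) PySem.Dict.empty := by
    rw [PySem.List.enumerate_eq_map_pyRange l ' ', List.foldl_map]
  rw [hmap]
  -- loop 2 over range(len(patt_arr)) is a fold over patt_arr
  have hloop2 := PySem.List.foldl_pyRange_zero_pyGetD p ' '
    (fun lowest_index c =>
      match ((PySem.List.enumerate l).foldl
        (fun m q =>
          match m.get? q.2 with
          | none => m.insert q.2 q.1
          | some _ => m) PySem.Dict.empty).get? c with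
      | some index => if lowest_index = -1 ∨ index < lowest_index then index else lowest_index
      | none => lowest_index) (-1)
  rw [hloop2]
  -- the built map is first-occurrence lookup
  have hg : ∀ c, ((PySem.List.enumerate l).foldl
      (fun m q =>
        match m.get? q.2 with
        | none => m.insert q.2 q.1
        | some _ => m) PySem.Dict.empty).get? c =
      (l.findIdx? (· == c)).map (fun k => ((k : Nat) : Int)) := by
    intro c
    rw [pvMap_get l 0 PySem.Dict.empty c]
    simp [PySem.Dict.get?_empty]
    cases l.findIdx? (fun x => x == c) <;> simp
  simp only [hg]
  set g : Char → Option Int := fun c => (l.findIdx? (· == c)).map (fun k => ((k : Nat) : Int)) with hgdef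
  have hnn : ∀ c j, g c = some j → 0 ≤ j := by
    intro c j h
    rw [hgdef] at h
    rcases Option.map_eq_some_iff.mp h with ⟨k, _, hk⟩
    omega
  rw [pvFold_sentinel g p hnn]
  -- B's side
  rw [pvAltGo_eq (PySem.Set.ofList p) l 0]
  have hpred : (fun ch => decide (ch ∈ PySem.Set.ofList p)) = (fun ch => decide (ch ∈ p)) := by
    funext ch; simp [PySem.Set.mem_ofList]
  rw [hpred]
  -- core combinatorial fact
  cases hfi : l.findIdx? (fun ch => decide (ch ∈ p)) with
  | none =>
      have hnone : ∀ ch ∈ l, ch ∉ p := by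
        intro ch hch
        have := List.findIdx?_eq_none_iff.mp hfi ch hch
        simpa using this
      have hempty : p.filterMap g = [] := by
        rw [List.filterMap_eq_nil_iff]
        intro c hc
        have hfc : l.findIdx? (· == c) = none := by
          rw [List.findIdx?_eq_none_iff]
          intro x hx
          simp only [beq_eq_false_iff_ne, ne_eq]
          intro hxc; exact hnone x hx (hxc ▸ hc)
        simp only [hgdef]
        simp [hfc]
      simp [hempty]
  | some k =>
      obtain ⟨hk, hpk, hmin⟩ := List.findIdx?_eq_some_iff_getElem.mp hfi
      have hpk' : l[k] ∈ p := by simpa using hpk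
      have hgk : g l[k] = some ((k : Nat) : Int) := by
        simp only [hgdef]
        have : l.findIdx? (· == l[k]) = some k := by
          rw [List.findIdx?_eq_some_iff_getElem]
          refine ⟨hk, by simp, ?_⟩
          intro j hj
          have hnpj := hmin j hj
          simp only [beq_iff_eq]
          intro heq
          have : l[j] ∈ p := by rw [show l[j] = l[k] from by simpa using heq]; exact hpk'
          simp [this] at hnpj
        rw [this]; rfl
      have hkmem : ((k : Nat) : Int) ∈ p.filterMap g := List.mem_filterMap.mpr ⟨l[k], hpk', hgk⟩
      have hlb : ∀ v ∈ p.filterMap g, ((k : Nat) : Int) ≤ v := by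
        intro v hv
        rcases List.mem_filterMap.mp hv with ⟨c, hcp, hgc⟩
        simp only [hgdef] at hgc
        rcases Option.map_eq_some_iff.mp hgc with ⟨j, hj, hv'⟩
        obtain ⟨hjlen, hcj, -⟩ := List.findIdx?_eq_some_iff_getElem.mp hj
        have hljp : l[j] ∈ p := by
          rw [show l[j] = c from by simpa using hcj]; exact hcp
        have : ¬ j < k := by
          intro hjk
          have := hmin j hjk
          simp [hljp] at this
        omega
      cases hval : p.filterMap g with
      | nil => rw [hval] at hkmem; simp at hkmem
      | cons j rest =>
          rw [hval] at hkmem hlb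
          have hub : rest.foldl min j ≤ ((k : Nat) : Int) := by
            rcases List.mem_cons.mp hkmem with h | h
            · rw [h]; exact (PySem.List.foldl_min_le rest j).1
            · exact (PySem.List.foldl_min_le rest j).2 _ h
          have hlo : ((k : Nat) : Int) ≤ rest.foldl min j := by
            rcases PySem.List.foldl_min_mem rest j with h | h
            · rw [h]; exact hlb j (List.mem_cons_self)
            · exact hlb _ (List.mem_cons_of_mem _ h)
          show List.foldl min j rest = 0 + ((k : Nat) : Int)
          omega

-- ===== VERDICT (by name: the statement is the Claim_ definition above) =====
theorem minimum_indexed_character_spec : Claim_equal_minimum_indexed_character := by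
  intro str patt _
  unfold Spec_minimum_indexed_character
  exact minimum_indexed_character_eq str patt
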